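-- pv_equiv track=rewrite | github.com/cxovrika/Information_Theory | hw1/PrefCode.py | generate_next_word
-- ===== SOURCE A (Python) =====
-- def generate_next_word(_word, size):
--     word = list(_word)
--     added = False
--     for i in reversed(range(len(word))):
--         if added: continue
--         if word[i] == '0': added = True
--         word[i] = '1' if word[i] == '0' else '0'
--
--     return ''.join(word + ['0' for i in range(size - len(word))])
-- ===== SOURCE B (Python) =====
-- def generate_next_word(_word, size):
--     n = len(_word)
--     i = _word.rfind('0')
--     if i == -1:
--         core = '0' * n
--     else:
--         core = _word[:i] + '1' + '0' * (n - i - 1)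
--     return core + '0' * max(0, size - n)
-- ===== Notes on version B (the rewrite author's own statement) =====
-- stated objective: simpler
-- what changed: Replaces A's right-to-left flip loop with a single rfind of the last '0' plus slicing: everything after that position becomes '0', that position becomes '1', the prefix is kept (all-zeros if no '0'), then pad.
import Mathlib
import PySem

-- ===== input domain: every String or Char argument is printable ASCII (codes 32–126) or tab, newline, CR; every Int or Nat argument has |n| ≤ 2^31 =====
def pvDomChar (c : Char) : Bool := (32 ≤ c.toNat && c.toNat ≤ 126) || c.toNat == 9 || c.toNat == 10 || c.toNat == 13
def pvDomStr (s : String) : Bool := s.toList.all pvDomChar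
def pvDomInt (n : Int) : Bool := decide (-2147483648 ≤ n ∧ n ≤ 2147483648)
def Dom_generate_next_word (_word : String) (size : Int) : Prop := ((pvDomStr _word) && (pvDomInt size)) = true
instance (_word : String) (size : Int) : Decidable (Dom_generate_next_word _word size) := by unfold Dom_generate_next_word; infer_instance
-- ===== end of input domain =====

-- B replaces A's right-to-left flip loop by locating the last '0' (rfind) and rebuilding the
-- word with slicing; same return value on every input (objective: simpler).

-- ===== PORT A =====
-- one iteration of A's loop body: state = (word, added), i the current index
def pvStep (st : List Char × Bool) (i : Nat) : List Char × Bool :=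
  if st.2 then st
  else
    let c := st.1.getD i ' '
    (st.1.set i (if c = '0' then '1' else '0'), c == '0')

def generate_next_word (_word : String) (size : Int) : String :=
  let word := _word.toList
  -- for i in reversed(range(len(word))): (indices are natural numbers)
  let res := ((List.range word.length).reverse.foldl pvStep (word, false)).1
  -- ''.join(word + ['0' for i in range(size - len(word))])
  String.ofList (res ++ List.replicate (size - (word.length : Int)).toNat '0')

-- ===== PORT B =====
-- hand port of _word.rfind('0') (exact for a single-character needle):
-- highest index of '0', or -1 when absent
def pvRfind0 (l : List Char) : Int :=
  match l.reverse.idxOf? '0' with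
  | some j => ((l.length - 1 - j : Nat) : Int)
  | none => -1

def generate_next_word_alt (_word : String) (size : Int) : String :=
  let l := _word.toList
  let n : Int := (l.length : Int)
  let i := pvRfind0 l
  let core :=
    if i = -1 then List.replicate l.length '0'
    else l.take i.toNat ++ '1' :: List.replicate (n - i - 1).toNat '0'
  String.ofList (core ++ List.replicate (max 0 (size - n)).toNat '0')

-- ===== PRECONDITION & SPEC =====
def Spec_generate_next_word (_word : String) (size : Int) (out : String) : Prop := out = generate_next_word_alt _word size
instance (_word : String) (size : Int) (out : String) : Decidable (Spec_generate_next_word _word size out) := by unfold Spec_generate_next_word; infer_instance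

-- ===== CLAIM (what is proved, stated in full; the proofs are below) =====
def Claim_equal_generate_next_word : Prop := ∀ (_word : String) (size : Int), Dom_generate_next_word _word size → Spec_generate_next_word _word size (generate_next_word _word size)

-- ===== LEMMAS AND PROOFS =====

-- A's loop core and B's core as standalone functions on the character list
def pvAcore (l : List Char) : List Char :=
  ((List.range l.length).reverse.foldl pvStep (l, false)).1

def pvBcore (l : List Char) : List Char :=
  match l.reverse.idxOf? '0' with
  | some j => l.take (l.length - 1 - j) ++ '1' :: List.replicate j '0'
  | none => List.replicate l.length '0'

theorem pvStep_done (is : List Nat) (w : List Char) :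
    is.foldl pvStep (w, true) = (w, true) := by
  induction is with
  | nil => rfl
  | cons i is ih => simpa [pvStep] using ih

theorem pvStep_frame (is : List Nat) (l : List Char) (x : Char) (b : Bool)
    (h : ∀ i ∈ is, i < l.length) :
    is.foldl pvStep (l ++ [x], b) =
      ((is.foldl pvStep (l, b)).1 ++ [x], (is.foldl pvStep (l, b)).2) := by
  induction is generalizing l b with
  | nil => rfl
  | cons i is ih =>
    have hi : i < l.length := h i (by simp)
    by_cases hb : b
    · subst hb
      simp only [List.foldl_cons, pvStep]
      simpa using ih l true (fun j hj => h j (by simp [hj]))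
    · simp only [Bool.not_eq_true] at hb; subst hb
      have hget : (l ++ [x]).getD i ' ' = l.getD i ' ' := by
        simp [List.getD, List.getElem?_append_left hi]
      have hset : ∀ c : Char, (l ++ [x]).set i c = l.set i c ++ [x] := by
        intro c; simp [List.set_append, Nat.not_le.mpr hi]
      simp only [List.foldl_cons, pvStep, hget, hset]
      exact ih _ _ (fun j hj => by simpa using h j (by simp [hj]))

theorem pvAcore_concat (l : List Char) (c : Char) :
    pvAcore (l ++ [c]) = if c = '0' then l ++ ['1'] else pvAcore l ++ ['0'] := by
  unfold pvAcore
  rw [show (l ++ [c]).length = l.length + 1 from by simp, List.range_succ,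
    List.reverse_append, List.reverse_singleton, List.singleton_append, List.foldl_cons]
  have hset : ∀ y : Char, (l ++ [c]).set l.length y = l ++ [y] := by
    intro y; simp
  by_cases hc : c = '0'
  · subst hc
    have hstep : pvStep (l ++ ['0'], false) l.length = (l ++ ['1'], true) := by
      simp [pvStep, hset]
    rw [hstep, pvStep_done, if_pos rfl]
  · have hstep : pvStep (l ++ [c], false) l.length = (l ++ ['0'], false) := by
      simp [pvStep, hset, hc]
    rw [hstep, if_neg hc,
      pvStep_frame _ l '0' false
        (fun i hi => by simpa using List.mem_range.mp (List.mem_reverse.mp hi))]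

theorem pvBcore_concat (l : List Char) (c : Char) :
    pvBcore (l ++ [c]) = if c = '0' then l ++ ['1'] else pvBcore l ++ ['0'] := by
  unfold pvBcore
  rw [List.reverse_append]
  simp only [List.reverse_singleton, List.singleton_append]
  by_cases hc : c = '0'
  · subst hc
    simp [List.idxOf?_cons, List.take_append_of_le_length (le_refl l.length)]
  · have hbeq : (c == '0') = false := by simpa using hc
    rw [List.idxOf?_cons]
    simp only [hbeq, Bool.false_eq_true, if_false, if_neg hc]
    cases hj : l.reverse.idxOf? '0' with
    | none =>
      show List.replicate (l ++ [c]).length '0' = List.replicate l.length '0' ++ ['0']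
      simp [List.replicate_succ']
    | some j =>
      obtain ⟨h1, -⟩ := List.idxOf?_eq_some_iff.mp hj
      have hjlt : j < l.length := by simpa using h1
      show List.take ((l ++ [c]).length - 1 - (j + 1)) (l ++ [c]) ++ '1' :: List.replicate (j + 1) '0'
          = (List.take (l.length - 1 - j) l ++ '1' :: List.replicate j '0') ++ ['0']
      have e1 : (l ++ [c]).length - 1 - (j + 1) = l.length - 1 - j := by
        simp; omega
      rw [e1, List.take_append_of_le_length (by omega), List.replicate_succ']
      simp

theorem pvAcore_eq_pvBcore (l : List Char) : pvAcore l = pvBcore l := by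
  induction l using List.reverseRecOn with
  | nil => rfl
  | append_singleton l c ih =>
    rw [pvAcore_concat, pvBcore_concat, ih]

theorem pvRfind0_none (l : List Char) (h : l.reverse.idxOf? '0' = none) :
    pvRfind0 l = -1 := by simp [pvRfind0, h]

theorem pvRfind0_some (l : List Char) (j : Nat) (h : l.reverse.idxOf? '0' = some j) :
    pvRfind0 l = ((l.length - 1 - j : Nat) : Int) := by simp [pvRfind0, h]

-- ===== VERDICT (by name: the statement is the Claim_ definition above) =====
theorem generate_next_word_spec : Claim_equal_generate_next_word := by
  intro _word size _
  unfold Spec_generate_next_word generate_next_word generate_next_word_alt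
  dsimp only
  have hcore := pvAcore_eq_pvBcore _word.toList
  unfold pvAcore pvBcore at hcore
  set l := _word.toList with hl
  have hpad : (size - (l.length : Int)).toNat = (max 0 (size - (l.length : Int))).toNat := by omega
  rw [hcore, hpad]
  congr 1
  cases hj : l.reverse.idxOf? '0' with
  | none =>
    rw [pvRfind0_none l hj]
    simp
  | some j =>
    obtain ⟨h1, -⟩ := List.idxOf?_eq_some_iff.mp hj
    have hjlt : j < l.length := by simpa using h1
    rw [pvRfind0_some l j hj]
    have hne : ((l.length - 1 - j : Nat) : Int) ≠ -1 := by omega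
    rw [if_neg hne]
    have e1 : ((l.length - 1 - j : Nat) : Int).toNat = l.length - 1 - j := by omega
    have e2 : ((l.length : Int) - ((l.length - 1 - j : Nat) : Int) - 1).toNat = j := by omega
    rw [e1, e2]
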